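-- pv_equiv track=rewrite | github.com/shuoshuc/astra-sim-artifacts | tools/place.py | init_torus_blocks
-- ===== SOURCE A (Python) =====
-- import itertools
--
-- def init_torus_blocks(dims, B):
--     """
--     Initialize a list of lists, where each list contains node indices of a BxBxB block in a WxLxH torus.
--     Nodes in the torus are indexed in plane-major order.
--     """
--     for dim in dims:
--         if dim % B != 0:
--             raise ValueError("Block size must divide each torus dimension exactly.")
--
--     blocks = []
--     W, L, H = dims
--     for z_start, y_start, x_start in itertools.product(
--         range(0, H, B), range(0, L, B), range(0, W, B)
--     ):
--         block = []
--         for z, y, x in itertools.product(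
--             range(z_start, z_start + B),
--             range(y_start, y_start + B),
--             range(x_start, x_start + B),
--         ):
--             block.append(z * (L * W) + y * W + x)
--         blocks.append(block)
--     return blocks
-- ===== SOURCE B (Python) =====
-- def init_torus_blocks(dims, B):
--     """
--     Same result as A, via a dimension-generic recursion: tile one axis at a
--     time, building the block list of the remaining axes once and lifting it
--     through the current axis with stride arithmetic.
--     """
--     for dim in dims:
--         if dim % B != 0:
--             raise ValueError("Block size must divide each torus dimension exactly.")
--     W, L, H = dims
--     return _tile([H, L, W], B)[0]
--
--
-- def _tile(ds, B):
--     """Blocks of the torus with dimension list ds (outermost axis first).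
--
--     Returns (blocks, n) where n is the product of ds and each node index is
--     in row-major order over ds.
--     """
--     if not ds:
--         return [[0]], 1
--     sub, stride = _tile(ds[1:], B)
--     d = ds[0]
--     blocks = [[c * stride + v for c in range(s0, s0 + B) for v in blk]
--               for s0 in range(0, d, B) for blk in sub]
--     return blocks, d * stride
-- ===== Notes on version B (the rewrite author's own statement) =====
-- stated objective: alternative
-- what changed: Replaces the fixed triple-nested itertools.product loops with a dimension-generic recursion: it tiles one axis at a time, building the block list of the remaining axes once and lifting it through the current axis by stride arithmetic.
import Mathlib
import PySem

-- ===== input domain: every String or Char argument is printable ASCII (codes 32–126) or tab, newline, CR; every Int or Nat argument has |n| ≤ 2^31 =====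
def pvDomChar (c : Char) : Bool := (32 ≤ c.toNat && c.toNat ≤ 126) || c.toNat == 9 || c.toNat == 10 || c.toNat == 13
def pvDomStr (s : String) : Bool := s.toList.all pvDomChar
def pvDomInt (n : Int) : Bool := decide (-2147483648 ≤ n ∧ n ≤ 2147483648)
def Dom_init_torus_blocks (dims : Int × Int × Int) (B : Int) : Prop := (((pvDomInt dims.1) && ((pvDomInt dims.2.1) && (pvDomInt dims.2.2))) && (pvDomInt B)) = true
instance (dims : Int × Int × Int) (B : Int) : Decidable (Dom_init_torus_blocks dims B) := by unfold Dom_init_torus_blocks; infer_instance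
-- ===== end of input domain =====

-- B replaces A's fixed triple-nested loops with a dimension-generic recursion that
-- tiles one axis at a time, lifting the blocks of the remaining axes by stride
-- arithmetic (alternative decomposition, same cost class).

-- ===== PORT A =====
-- The validation loop ('dim % B != 0' → ValueError; B = 0 → ZeroDivisionError) only
-- raises; those inputs are excluded by Pre_, so the port carries the loop body's effect
-- solely through Pre_ and transliterates the returning path.
def init_torus_blocks (dims : Int × Int × Int) (B : Int) : List (List Int) :=
  let W := dims.1
  let L := dims.2.1
  let H := dims.2.2
  (PySem.List.pyRange 0 H B).foldl (fun blocks z_start =>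
    (PySem.List.pyRange 0 L B).foldl (fun blocks y_start =>
      (PySem.List.pyRange 0 W B).foldl (fun blocks x_start =>
        blocks ++ [
          (PySem.List.pyRange z_start (z_start + B) 1).foldl (fun block z =>
            (PySem.List.pyRange y_start (y_start + B) 1).foldl (fun block y =>
              (PySem.List.pyRange x_start (x_start + B) 1).foldl (fun block x =>
                block ++ [z * (L * W) + y * W + x]) block) block) [] ])
        blocks) blocks) []

-- ===== PORT B =====
-- _tile ds B = (blocks, product of ds); recursion on the dimension list, outermost axis first
def pvTile (Bv : Int) : List Int → List (List Int) × Int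
  | [] => ([[0]], 1)
  | d :: rest =>
    let sp := pvTile Bv rest
    ((PySem.List.pyRange 0 d Bv).flatMap (fun s0 =>
        sp.1.map (fun blk =>
          (PySem.List.pyRange s0 (s0 + Bv) 1).flatMap (fun c =>
            blk.map (fun v => c * sp.2 + v)))),
     d * sp.2)

def init_torus_blocks_alt (dims : Int × Int × Int) (B : Int) : List (List Int) :=
  let W := dims.1
  let L := dims.2.1
  let H := dims.2.2
  (pvTile B [H, L, W]).1

-- ===== PRECONDITION & SPEC =====
-- Pre_ excludes exactly the inputs where Python A raises: B = 0 (ZeroDivisionError in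
-- 'dim % B') and any dimension not divisible by B (ValueError).
def Pre_init_torus_blocks (dims : Int × Int × Int) (B : Int) : Prop :=
  B ≠ 0 ∧ PySem.Int.mod dims.1 B = 0 ∧ PySem.Int.mod dims.2.1 B = 0 ∧ PySem.Int.mod dims.2.2 B = 0
instance (dims : Int × Int × Int) (B : Int) : Decidable (Pre_init_torus_blocks dims B) := by unfold Pre_init_torus_blocks; infer_instance
def pvWitness_init_torus_blocks : (Int × Int × Int) × Int := ((4, 2, 2), 2)

def Spec_init_torus_blocks (dims : Int × Int × Int) (B : Int) (out : List (List Int)) : Prop := out = init_torus_blocks_alt dims B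
instance (dims : Int × Int × Int) (B : Int) (out : List (List Int)) : Decidable (Spec_init_torus_blocks dims B out) := by unfold Spec_init_torus_blocks; infer_instance

-- ===== CLAIM (what is proved, stated in full; the proofs are below) =====
def Claim_equal_init_torus_blocks : Prop := ∀ (dims : Int × Int × Int) (B : Int), Dom_init_torus_blocks dims B → Pre_init_torus_blocks dims B → Spec_init_torus_blocks dims B (init_torus_blocks dims B)

-- ===== LEMMAS AND PROOFS =====
-- flatMap of singletons is a map
theorem pv_flatMap_pure {α β : Type} (l : List α) (f : α → β) :
    l.flatMap (fun a => [f a]) = l.map f := by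
  induction l with
  | nil => rfl
  | cons h t ih => simp [ih]

-- ===== VERDICT (by name: the statement is the Claim_ definition above) =====
theorem init_torus_blocks_spec : Claim_equal_init_torus_blocks := by
  intro dims B _ _
  unfold Spec_init_torus_blocks init_torus_blocks init_torus_blocks_alt
  simp only [pvTile, PySem.List.foldl_append_singleton_eq_map,
    PySem.List.foldl_append_eq_flatMap, List.nil_append,
    List.map_flatMap, List.map_map, List.map_cons, List.map_nil, pv_flatMap_pure]
  apply List.flatMap_congr
  intro z0 _
  apply List.flatMap_congr
  intro y0 _
  apply List.map_congr_left
  intro x0 _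
  simp only [Function.comp, List.map_flatMap, List.map_map]
  apply List.flatMap_congr
  intro z _
  apply List.flatMap_congr
  intro y _
  apply List.map_congr_left
  intro x _
  simp [Function.comp]
  ring
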